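-- pv_equiv track=rewrite | github.com/RuStealsMelons/ZmwResourceSharing | flasker/controllers/login.py | offset_str
-- ===== SOURCE A (Python) =====
-- def offset_str(s):
--     res = ''
--     for c in s:
--         ascii_code = ord(c)  # 将字符转换成ASCII码
--         offset_code = ascii_code - 10  # 偏移10
--         offset_char = chr(offset_code)  # 将偏移后的ASCII码转换成字符
--         res += offset_char
--     return res
-- ===== SOURCE B (Python) =====
-- def offset_str(s):
--     # Divide and conquer: a one-char string shifts directly; longer strings
--     # are split in half, shifted recursively, and concatenated.
--     if len(s) == 0:
--         return ''
--     if len(s) == 1: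
--         return chr(ord(s) - 10)
--     mid = len(s) // 2
--     return offset_str(s[:mid]) + offset_str(s[mid:])
-- ===== Notes on version B (the rewrite author's own statement) =====
-- stated objective: alternative
-- what changed: Replaced the left-to-right accumulation loop by a divide-and-conquer recursion: split the string in half, shift each half recursively, and concatenate; the base case shifts a single character.
import Mathlib
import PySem

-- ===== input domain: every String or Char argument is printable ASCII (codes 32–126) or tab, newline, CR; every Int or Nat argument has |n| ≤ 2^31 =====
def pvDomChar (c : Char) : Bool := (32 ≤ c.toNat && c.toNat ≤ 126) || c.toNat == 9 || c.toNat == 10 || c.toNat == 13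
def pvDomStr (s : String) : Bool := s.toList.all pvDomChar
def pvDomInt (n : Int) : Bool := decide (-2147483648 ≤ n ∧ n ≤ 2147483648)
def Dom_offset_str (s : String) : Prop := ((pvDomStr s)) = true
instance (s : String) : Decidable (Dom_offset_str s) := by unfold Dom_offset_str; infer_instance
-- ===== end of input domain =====

-- B replaces A's left-to-right accumulation loop by a divide-and-conquer recursion
-- (split in half, shift each half, concatenate); objective: alternative.

-- ===== PORT A =====
-- A: res = ''; for c in s: res += chr(ord(c) - 10)
def offset_str (s : String) : String :=
  s.toList.foldl (fun res c => res ++ String.singleton (Char.ofNat (c.toNat - 10))) ""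

-- ===== PORT B =====
-- B's recursion, on the character list; s[:mid] / s[mid:] with 0 ≤ mid ≤ len are
-- exactly List.take mid / List.drop mid (exact port of the nonnegative in-range slice).
def offset_str_alt_core (l : List Char) : List Char :=
  if l.length = 0 then []
  else if l.length = 1 then [Char.ofNat ((l.headD default).toNat - 10)]
  else
    let mid := l.length / 2
    offset_str_alt_core (l.take mid) ++ offset_str_alt_core (l.drop mid)
termination_by l.length
decreasing_by
  · simp only [List.length_take]; omega
  · simp only [List.length_drop]; omega

def offset_str_alt (s : String) : String :=
  String.ofList (offset_str_alt_core s.toList)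

-- ===== PRECONDITION & SPEC =====
-- Pre_ excludes strings containing a character with code point < 10 (within Dom: only
-- tab), on which Python A raises ValueError (chr of a negative int); B raises there too.
def Pre_offset_str (s : String) : Prop := s.toList.all (fun c => 10 ≤ c.toNat) = true
instance (s : String) : Decidable (Pre_offset_str s) := by unfold Pre_offset_str; infer_instance
def pvWitness_offset_str : String := "Hello"
def Spec_offset_str (s : String) (out : String) : Prop := out = offset_str_alt s
instance (s : String) (out : String) : Decidable (Spec_offset_str s out) := by unfold Spec_offset_str; infer_instance

-- ===== CLAIM (what is proved, stated in full; the proofs are below) =====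
def Claim_equal_offset_str : Prop := ∀ (s : String), Dom_offset_str s → Pre_offset_str s → Spec_offset_str s (offset_str s)

-- ===== LEMMAS AND PROOFS =====

-- B's divide-and-conquer computes the pointwise shift
theorem offset_str_alt_core_eq_map (l : List Char) :
    offset_str_alt_core l = l.map (fun c => Char.ofNat (c.toNat - 10)) := by
  induction l using offset_str_alt_core.induct with
  | case1 l h =>
    rw [offset_str_alt_core]
    simp_all [List.length_eq_zero_iff.mp h]
  | case2 l h0 h1 =>
    rw [offset_str_alt_core]
    obtain ⟨c, rfl⟩ := List.length_eq_one_iff.mp h1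
    simp
  | case3 l h0 h1 mid ihT ihD =>
    rw [offset_str_alt_core, if_neg h0, if_neg h1]
    show offset_str_alt_core (List.take (l.length / 2) l) ++ offset_str_alt_core (List.drop (l.length / 2) l) = _
    rw [ihT, ihD, ← List.map_append, List.take_append_drop]

-- A's append loop computes the same pointwise map
theorem offset_str_eq_map (s : String) :
    offset_str s = String.ofList (s.toList.map (fun c => Char.ofNat (c.toNat - 10))) := by
  unfold offset_str
  suffices h : ∀ (l : List Char) (a : String),
      l.foldl (fun res c => res ++ String.singleton (Char.ofNat (c.toNat - 10))) a
        = a ++ String.ofList (l.map (fun c => Char.ofNat (c.toNat - 10))) by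
    simpa using h s.toList ""
  intro l
  induction l with
  | nil =>
    intro a
    apply String.ext
    simp
  | cons x xs ih =>
    intro a
    simp only [List.foldl_cons, List.map_cons, ih]
    apply String.ext
    simp [String.singleton]

-- ===== VERDICT (by name: the statement is the Claim_ definition above) =====
theorem offset_str_spec : Claim_equal_offset_str := by
  intro s _ _
  unfold Spec_offset_str offset_str_alt
  rw [offset_str_eq_map, offset_str_alt_core_eq_map]
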